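-- pv_equiv track=rewrite | github.com/jhyang12345/algorithm-problems | google_prep/track_bst_path.py | bst_path
-- ===== SOURCE A (Python) =====
-- def bst_path(number):
--     ret = []
--     num = number
--     while num > 1:
--         r = num % 2
--         if r == 1:
--             ret.append('right')
--         else:
--             ret.append('left')
--         num //= 2
--     return ret[::-1]
-- ===== SOURCE B (Python) =====
-- def bst_path(number):
--     if number <= 1:
--         return []
--     bits = bin(number)[3:]
--     return ['right' if c == '1' else 'left' for c in bits]
-- ===== Notes on version B (the rewrite author's own statement) =====
-- stated objective: idiomatic
-- what changed: Replaces the mod/floor-div accumulate-then-reverse loop with bin(number)[3:] (binary digits already MSB-first, leading 1 dropped) and a single forward comprehension.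
import Mathlib
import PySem

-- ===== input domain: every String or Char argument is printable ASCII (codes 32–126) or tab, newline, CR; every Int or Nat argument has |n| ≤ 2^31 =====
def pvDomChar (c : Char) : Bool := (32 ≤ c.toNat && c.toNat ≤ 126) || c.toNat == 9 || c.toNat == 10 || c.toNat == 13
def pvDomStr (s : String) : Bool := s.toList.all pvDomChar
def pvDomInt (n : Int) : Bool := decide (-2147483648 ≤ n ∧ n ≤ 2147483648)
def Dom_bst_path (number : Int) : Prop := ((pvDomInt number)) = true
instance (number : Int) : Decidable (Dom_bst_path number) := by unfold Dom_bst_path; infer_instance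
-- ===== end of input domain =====

-- B replaces A's mod/floor-div accumulate-then-reverse loop by the binary string
-- (bin(number)[3:]) read MSB-first in one forward pass; return values agree for every Int.

-- ===== PORT A =====
-- the while loop: state (num, ret); appends 'right'/'left' per low bit, halves num
def bstLoopA (num : Int) (ret : List String) : List String :=
  if _h : num > 1 then
    bstLoopA (PySem.Int.floordiv num 2)
      (ret ++ [if PySem.Int.mod num 2 == 1 then "right" else "left"])
  else ret
termination_by num.toNat
decreasing_by
  have h2 : PySem.Int.floordiv num 2 = num / 2 :=
    PySem.Int.floordiv_eq_ediv_of_pos (by omega)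
  rw [h2]; omega

def bst_path (number : Int) : List String :=
  (bstLoopA number []).reverse   -- ret[::-1]

-- ===== PORT B =====
-- binary digits of n (MSB first), as Python's bin(n) without the '0b' prefix (n > 0)
def binChars (n : Nat) : List Char :=
  if n = 0 then [] else binChars (n / 2) ++ [if n % 2 == 1 then '1' else '0']

def bst_path_alt (number : Int) : List String :=
  if number ≤ 1 then []
  else ((binChars number.toNat).drop 1).map (fun c => if c == '1' then "right" else "left")

-- ===== PRECONDITION & SPEC =====
def Spec_bst_path (number : Int) (out : List String) : Prop := out = bst_path_alt number
instance (number : Int) (out : List String) : Decidable (Spec_bst_path number out) := by unfold Spec_bst_path; infer_instance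

-- ===== CLAIM (what is proved, stated in full; the proofs are below) =====
def Claim_equal_bst_path : Prop := ∀ (number : Int), Dom_bst_path number → Spec_bst_path number (bst_path number)

-- ===== LEMMAS AND PROOFS =====

theorem binChars_ne_nil {n : Nat} (h : n ≠ 0) : binChars n ≠ [] := by
  rw [binChars]; simp [h]

theorem bstLoopA_append_aux : ∀ (n : Nat) (num : Int), num.toNat = n →
    ∀ ret, bstLoopA num ret = ret ++ bstLoopA num [] := by
  intro n
  induction n using Nat.strong_induction_on with
  | _ n ih =>
    intro num hn ret
    by_cases h : num > 1
    · have h2 : PySem.Int.floordiv num 2 = num / 2 :=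
        PySem.Int.floordiv_eq_ediv_of_pos (by omega)
      have hlt : (PySem.Int.floordiv num 2).toNat < n := by rw [h2]; omega
      rw [bstLoopA, dif_pos h,
        ih _ hlt _ rfl (ret ++ [if PySem.Int.mod num 2 == 1 then "right" else "left"])]
      conv_rhs => rw [bstLoopA, dif_pos h,
        ih _ hlt _ rfl ([] ++ [if PySem.Int.mod num 2 == 1 then "right" else "left"])]
      simp
    · rw [bstLoopA, dif_neg h, bstLoopA, dif_neg h]; simp

theorem bstLoopA_append (num : Int) (ret : List String) :
    bstLoopA num ret = ret ++ bstLoopA num [] :=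
  bstLoopA_append_aux num.toNat num rfl ret

theorem key (n : Nat) (h : 2 ≤ n) :
    (bstLoopA (n : Int) []).reverse =
      ((binChars n).drop 1).map (fun c => if c == '1' then "right" else "left") := by
  induction n using Nat.strong_induction_on with
  | _ n ih =>
    have hgt : (n : Int) > 1 := by exact_mod_cast h
    have hfd : PySem.Int.floordiv (n : Int) 2 = ((n / 2 : Nat) : Int) :=
      PySem.Int.floordiv_natCast n 2
    have hmd : PySem.Int.mod (n : Int) 2 = ((n % 2 : Nat) : Int) :=
      PySem.Int.mod_natCast n 2
    rw [bstLoopA, dif_pos hgt, bstLoopA_append, hfd, hmd]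
    by_cases h4 : n / 2 ≥ 2
    · have ihrec := ih (n / 2) (by omega) h4
      have hne : binChars (n / 2) ≠ [] := binChars_ne_nil (by omega)
      have hlen : 1 ≤ (binChars (n / 2)).length := by
        cases hb : binChars (n / 2) with
        | nil => exact absurd hb hne
        | cons a l => simp
      conv_rhs => rw [binChars]
      rw [if_neg (by omega : ¬ n = 0), List.drop_append_of_le_length hlen,
        List.map_append, ← ihrec]
      rcases Nat.mod_two_eq_zero_or_one n with hp | hp <;> simp [hp]
    · have hh : n / 2 = 1 := by omega
      have hstop : ¬ ((1 : Int) > 1) := by omega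
      rw [hh]
      conv_rhs => rw [binChars]
      rw [if_neg (by omega : ¬ n = 0), hh]
      rw [binChars, if_neg (by omega : ¬ (1:Nat) = 0), binChars, if_pos rfl]
      rw [bstLoopA]
      simp only [Nat.cast_one, hstop, dite_false]
      rcases Nat.mod_two_eq_zero_or_one n with hp | hp <;> simp [hp]

-- ===== VERDICT (by name: the statement is the Claim_ definition above) =====
theorem bst_path_spec : Claim_equal_bst_path := by
  intro number _
  unfold Spec_bst_path bst_path
  by_cases hle : number ≤ 1
  · rw [bstLoopA, dif_neg (by omega)]
    simp [bst_path_alt, hle]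
  · have hn : ((number.toNat : Nat) : Int) = number := Int.toNat_of_nonneg (by omega)
    have h2 : 2 ≤ number.toNat := by omega
    rw [bst_path_alt, if_neg (by omega)]
    rw [← hn]
    exact key number.toNat h2
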